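-- pv_equiv track=rewrite | github.com/Dinhh-Chan/detaibo_last | crawler.py | convert_iso_tree
-- ===== SOURCE A (Python) =====
-- def convert_iso_tree(arr_text):
--     arr_res = []
--     for elements in arr_text :
--         res =""
--         texts = elements.split(".")
--         tree = ""
--         for i in range(len(texts)) :
--
--             tree = tree + texts[i]
--             res = res + tree +"[RIPT]"
--             tree = tree +"."
--         arr_res.append(res[0:-6] )
--     return arr_res
-- ===== SOURCE B (Python) =====
-- def convert_iso_tree(arr_text):
--     out = []
--     for elements in arr_text:
--         parts = elements.split(".")
--         out.append("[RIPT]".join(".".join(parts[:i + 1]) for i in range(len(parts))))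
--     return out
-- ===== Notes on version B (the rewrite author's own statement) =====
-- stated objective: simpler
-- what changed: Replaces the running tree/res string accumulators and the res[0:-6] trailing-separator trim with a per-index join of dotted prefixes, letting '[RIPT]'.join supply the separators.
import Mathlib
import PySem

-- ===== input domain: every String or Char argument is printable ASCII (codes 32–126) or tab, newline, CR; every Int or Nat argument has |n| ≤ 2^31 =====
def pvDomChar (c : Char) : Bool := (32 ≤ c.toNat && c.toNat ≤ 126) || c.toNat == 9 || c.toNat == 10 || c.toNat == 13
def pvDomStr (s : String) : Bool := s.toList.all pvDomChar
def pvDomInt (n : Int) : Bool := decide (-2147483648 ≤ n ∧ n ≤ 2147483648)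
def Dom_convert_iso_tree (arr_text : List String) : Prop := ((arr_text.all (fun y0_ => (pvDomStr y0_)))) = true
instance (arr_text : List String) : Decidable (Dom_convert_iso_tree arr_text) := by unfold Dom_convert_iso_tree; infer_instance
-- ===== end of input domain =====

-- B replaces A's running tree/res string accumulators and the res[0:-6] trim with a
-- per-index join of dotted prefixes, letting '[RIPT]'.join supply the separators (simpler).

-- ===== PORT A =====
def convert_iso_tree (arr_text : List String) : List String :=
  arr_text.foldl (fun arr_res elements =>
    let texts := PySem.Chars.splitOn elements.toList ['.']
    let st := (PySem.List.pyRange 0 (texts.length : Int) 1).foldl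
      (fun (st : List Char × List Char) i =>
        let tree := st.1 ++ PySem.List.pyGetD texts i []
        (tree ++ ['.'], st.2 ++ tree ++ "[RIPT]".toList)) ([], [])
    arr_res ++ [String.ofList (PySem.List.slice st.2 (some 0) (some (-6)))]) []

-- ===== PORT B =====
def convert_iso_tree_alt (arr_text : List String) : List String :=
  arr_text.map (fun s =>
    let parts := PySem.Chars.splitOn s.toList ['.']
    String.ofList (PySem.Chars.join "[RIPT]".toList
      ((List.range parts.length).map (fun i => PySem.Chars.join ['.'] (parts.take (i + 1))))))

-- ===== PRECONDITION & SPEC =====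
def Spec_convert_iso_tree (arr_text : List String) (out : List String) : Prop := out = convert_iso_tree_alt arr_text
instance (arr_text : List String) (out : List String) : Decidable (Spec_convert_iso_tree arr_text out) := by unfold Spec_convert_iso_tree; infer_instance

-- ===== CLAIM (what is proved, stated in full; the proofs are below) =====
def Claim_equal_convert_iso_tree : Prop := ∀ (arr_text : List String), Dom_convert_iso_tree arr_text → Spec_convert_iso_tree arr_text (convert_iso_tree arr_text)

-- ===== LEMMAS AND PROOFS =====

theorem splitOn_go_ne_nil (sep : List Char) (fuel : Nat) (l cur : List Char)
    (acc : List (List Char)) : PySem.Chars.splitOn.go sep fuel l cur acc ≠ [] := by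
  induction fuel generalizing l cur acc with
  | zero => simp [PySem.Chars.splitOn.go]
  | succ n ih =>
    cases l with
    | nil => simp [PySem.Chars.splitOn.go]
    | cons c rest =>
      rw [PySem.Chars.splitOn.go]
      split_ifs with h
      · exact ih _ _ _
      · exact ih _ _ _

theorem splitOn_ne_nil (s sep : List Char) : PySem.Chars.splitOn s sep ≠ [] :=
  splitOn_go_ne_nil sep _ s [] []

-- the inner loop of A, after replacing the index loop by a fold over the list itself
theorem inner_foldl (t : List (List Char)) (tree res : List Char) :
    (t.foldl (fun (st : List Char × List Char) c =>
        (st.1 ++ (c ++ ['.']), st.2 ++ (st.1 ++ (c ++ "[RIPT]".toList)))) (tree, res)).2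
    = res ++ (List.range t.length).flatMap
        (fun i => tree ++ (PySem.Chars.join ['.'] (t.take (i + 1)) ++ "[RIPT]".toList)) := by
  induction t generalizing tree res with
  | nil => simp
  | cons c t ih =>
    rw [List.foldl_cons, ih, List.length_cons, List.range_succ_eq_map, List.flatMap_cons]
    have h1 : ((List.range t.length).map Nat.succ).flatMap
        (fun i => tree ++ (PySem.Chars.join ['.'] ((c :: t).take (i + 1)) ++ "[RIPT]".toList))
        = (List.range t.length).flatMap
            (fun i => (tree ++ (c ++ ['.'])) ++ (PySem.Chars.join ['.'] (t.take (i + 1)) ++ "[RIPT]".toList)) := by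
      rw [List.flatMap_map]
      apply List.flatMap_congr
      intro i hi
      have hlt : i < t.length := List.mem_range.mp hi
      have hne : t.take (i + 1) ≠ [] := by
        cases t with
        | nil => simp at hlt
        | cons a u => simp
      obtain ⟨a, u, hau⟩ := List.exists_cons_of_ne_nil hne
      have : (c :: t).take (Nat.succ i + 1) = c :: t.take (i + 1) := List.take_succ_cons
      rw [this, hau, PySem.Chars.join_cons_cons, ← hau]
      simp [List.append_assoc]
    rw [h1]
    simp [PySem.Chars.join_singleton, List.append_assoc]

theorem flatMap_append_eq_join (R : List Char) (l : List (List Char)) (hl : l ≠ []) :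
    l.flatMap (fun p => p ++ R) = PySem.Chars.join R l ++ R := by
  induction l with
  | nil => exact absurd rfl hl
  | cons x l ih =>
    cases l with
    | nil => simp [PySem.Chars.join_singleton]
    | cons y l =>
      rw [PySem.Chars.join_cons_cons, List.flatMap_cons, ih (by simp)]
      simp [List.append_assoc]

theorem trim_append (s : List Char) :
    PySem.List.slice (s ++ "[RIPT]".toList) (some 0) (some (-6)) = s := by
  rw [PySem.List.slice_zero_start, PySem.List.slice_to_neg_ofNat _ 6 (by omega)]
  have : (s ++ "[RIPT]".toList).length - 6 = s.length := by simp
  rw [this, List.take_left]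

theorem per_element (s : String) :
    String.ofList (PySem.List.slice
      ((PySem.List.pyRange 0 ((PySem.Chars.splitOn s.toList ['.']).length : Int) 1).foldl
        (fun (st : List Char × List Char) i =>
          let tree := st.1 ++ PySem.List.pyGetD (PySem.Chars.splitOn s.toList ['.']) i []
          (tree ++ ['.'], st.2 ++ tree ++ "[RIPT]".toList)) ([], [])).2
      (some 0) (some (-6)))
    = String.ofList (PySem.Chars.join "[RIPT]".toList
        ((List.range (PySem.Chars.splitOn s.toList ['.']).length).map
          (fun i => PySem.Chars.join ['.'] ((PySem.Chars.splitOn s.toList ['.']).take (i + 1))))) := by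
  set t := PySem.Chars.splitOn s.toList ['.'] with ht
  have hfold := PySem.List.foldl_pyRange_zero_pyGetD' t ([] : List Char)
    (fun (st : List Char × List Char) c => (st.1 ++ (c ++ ['.']), st.2 ++ (st.1 ++ (c ++ "[RIPT]".toList))))
    (([], []) : List Char × List Char)
  simp only [List.append_assoc] at hfold ⊢
  rw [hfold, inner_foldl]
  have htne : t ≠ [] := by rw [ht]; exact splitOn_ne_nil s.toList ['.']
  have hP : (List.range t.length).map (fun i => PySem.Chars.join ['.'] (t.take (i + 1))) ≠ [] := by
    simp [List.range_eq_nil, List.length_eq_zero_iff, htne]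
  have hflat : (List.range t.length).flatMap
      (fun i => ([] : List Char) ++ (PySem.Chars.join ['.'] (t.take (i + 1)) ++ "[RIPT]".toList))
      = ((List.range t.length).map (fun i => PySem.Chars.join ['.'] (t.take (i + 1)))).flatMap
          (fun p => p ++ "[RIPT]".toList) := by
    simp [List.flatMap_map]
  rw [hflat, flatMap_append_eq_join _ _ hP, List.nil_append, trim_append]

-- ===== VERDICT (by name: the statement is the Claim_ definition above) =====
theorem convert_iso_tree_spec : Claim_equal_convert_iso_tree := by
  intro arr_text _
  unfold Spec_convert_iso_tree convert_iso_tree convert_iso_tree_alt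
  rw [PySem.List.foldl_append_singleton_eq_map]
  rw [List.nil_append]
  apply List.map_congr_left
  intro s _
  exact per_element s
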